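-- pv_equiv track=rewrite | github.com/Geirdriful/my-wordle | utils.py | orange_letters
-- ===== SOURCE A (Python) =====
-- def orange_letters(list_wotd, list_player_word):
--
-- 	list_return = list()
--
-- 	for index_wotd in range(0,len(list_wotd)):
-- 		already_done = False
-- 		for index_player_word in range(0, len(list_player_word)):
-- 			if list_wotd[index_wotd] == list_player_word[index_player_word]:
-- 				count_wotd = list_wotd.count(list_wotd[index_wotd])
-- 				count_player_word = list_player_word.count(list_player_word[index_player_word])
--
-- 				''' If list_player_word contains more than one occurence of the same letter whereas list_wotd not, then only one letter
-- 				are colored in orange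
-- 				If list_word contains more than one occurence of the same letter whereas list_player_word not, then only one letter
-- 				are colored in orange '''
--
-- 				if count_player_word >= count_wotd and already_done == False:
-- 					already_done = True
-- 					list_return.append(index_player_word)
-- 				elif count_player_word < count_wotd and already_done == False:
-- 					list_return.append(index_player_word)
--
-- 	return list_return
-- ===== SOURCE B (Python) =====
-- def orange_letters(list_wotd, list_player_word):
-- 	# index lists per letter in player word, built once
-- 	positions = {}
-- 	for j, letter in enumerate(list_player_word):
-- 		positions.setdefault(letter, []).append(j)
-- 	# counts per letter in word-of-the-day, built once
-- 	counts = {}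
-- 	for letter in list_wotd:
-- 		counts[letter] = counts.get(letter, 0) + 1
-- 	out = []
-- 	for letter in list_wotd:
-- 		js = positions.get(letter)
-- 		if js is not None:
-- 			if len(js) >= counts[letter]:
-- 				out.append(js[0])
-- 			else:
-- 				out.extend(js)
-- 	return out
-- ===== Notes on version B (the rewrite author's own statement) =====
-- stated objective: faster
-- what changed: Replaced A's nested index loops with repeated list.count calls inside the inner loop by two dicts built once (per-letter index lists of the player word and per-letter counts of the word of the day), then a single lookup pass over list_wotd emits either the first index or all indices of each letter.
import Mathlib
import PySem

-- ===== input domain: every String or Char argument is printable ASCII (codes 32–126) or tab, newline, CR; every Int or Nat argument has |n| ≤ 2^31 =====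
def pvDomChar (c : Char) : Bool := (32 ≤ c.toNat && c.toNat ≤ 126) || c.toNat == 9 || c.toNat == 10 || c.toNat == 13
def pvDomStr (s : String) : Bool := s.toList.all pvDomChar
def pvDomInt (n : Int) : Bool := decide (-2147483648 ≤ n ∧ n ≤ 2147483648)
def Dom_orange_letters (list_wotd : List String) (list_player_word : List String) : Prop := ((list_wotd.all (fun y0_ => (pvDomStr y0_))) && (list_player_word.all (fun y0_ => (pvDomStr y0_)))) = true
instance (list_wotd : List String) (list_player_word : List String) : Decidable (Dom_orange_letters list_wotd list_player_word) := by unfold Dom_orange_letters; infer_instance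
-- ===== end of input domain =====

-- B replaces A's nested index scans with repeated .count calls by dicts (per-letter index
-- lists of the player word and per-letter counts of the word of the day) built once,
-- followed by a single lookup pass over list_wotd (objective: faster).

-- ===== PORT A =====
-- literal transliteration of A: nested index loops, counts recomputed inside the inner loop
def orange_letters (list_wotd : List String) (list_player_word : List String) : List Int :=
  (PySem.List.pyRange 0 (PySem.List.len list_wotd)).foldl
    (fun list_return index_wotd =>
      ((PySem.List.pyRange 0 (PySem.List.len list_player_word)).foldl
        (fun (st : List Int × Bool) index_player_word =>
          if PySem.List.pyGetD list_wotd index_wotd "" = PySem.List.pyGetD list_player_word index_player_word "" then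
            let count_wotd := PySem.List.count list_wotd (PySem.List.pyGetD list_wotd index_wotd "")
            let count_player_word := PySem.List.count list_player_word (PySem.List.pyGetD list_player_word index_player_word "")
            if count_player_word ≥ count_wotd ∧ st.2 = false then (st.1 ++ [index_player_word], true)
            else if count_player_word < count_wotd ∧ st.2 = false then (st.1 ++ [index_player_word], st.2)
            else st
          else st)
        (list_return, false)).1)
    []

-- ===== PORT B =====
-- transliteration of Source B: positions = per-letter index lists of the player word,
-- counts = per-letter counts of the word of the day, then one lookup pass.
-- (js[0] and counts[letter] are ported with a default; both are only reached where
-- Source B cannot raise: js is never empty and letter is then always a key of counts.)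
def orange_letters_alt (list_wotd : List String) (list_player_word : List String) : List Int :=
  let positions : PySem.Dict String (List Int) :=
    (list_player_word.zipIdx).foldl
      (fun d x => d.insert x.1 (d.getD x.1 [] ++ [((x.2 : Nat) : Int)])) PySem.Dict.empty
  let counts : PySem.Dict String Int :=
    list_wotd.foldl (fun d letter => d.insert letter (d.getD letter 0 + 1)) PySem.Dict.empty
  list_wotd.foldl
    (fun out letter =>
      match positions.get? letter with
      | none => out
      | some js =>
          if (js.length : Int) ≥ counts.getD letter 0 then out ++ [PySem.List.pyGetD js 0 0]
          else out ++ js)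
    []

-- ===== PRECONDITION & SPEC =====
def Spec_orange_letters (list_wotd : List String) (list_player_word : List String) (out : List Int) : Prop := out = orange_letters_alt list_wotd list_player_word
instance (list_wotd : List String) (list_player_word : List String) (out : List Int) : Decidable (Spec_orange_letters list_wotd list_player_word out) := by unfold Spec_orange_letters; infer_instance

-- ===== CLAIM (what is proved, stated in full; the proofs are below) =====
def Claim_equal_orange_letters : Prop := ∀ (list_wotd : List String) (list_player_word : List String), Dom_orange_letters list_wotd list_player_word → Spec_orange_letters list_wotd list_player_word (orange_letters list_wotd list_player_word)

-- ===== LEMMAS AND PROOFS =====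

-- the indices (as Ints) of the (letter, index) pairs of l whose letter is c
def pvMs (c : String) (l : List (String × Nat)) : List Int :=
  (l.filter (fun x => decide (c = x.1))).map (fun x => ((x.2 : Nat) : Int))

-- A's inner-loop step with the outer letter c abstracted
def pvStp (list_wotd list_player_word : List String) (c : String)
    (st : List Int × Bool) (x : String × Nat) : List Int × Bool :=
  if c = x.1 then
    if PySem.List.count list_player_word c ≥ PySem.List.count list_wotd c ∧ st.2 = false then
      (st.1 ++ [((x.2 : Nat) : Int)], true)
    else if PySem.List.count list_player_word c < PySem.List.count list_wotd c ∧ st.2 = false then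
      (st.1 ++ [((x.2 : Nat) : Int)], st.2)
    else st
  else st

-- A's outer-loop body with the letter list_wotd[index_wotd] abstracted as c
def pvOuterStep (list_wotd list_player_word : List String) (acc : List Int) (c : String) : List Int :=
  ((PySem.List.pyRange 0 (PySem.List.len list_player_word)).foldl
    (fun (st : List Int × Bool) j =>
      if c = PySem.List.pyGetD list_player_word j "" then
        if PySem.List.count list_player_word (PySem.List.pyGetD list_player_word j "") ≥ PySem.List.count list_wotd c ∧ st.2 = false then
          (st.1 ++ [j], true)
        else if PySem.List.count list_player_word (PySem.List.pyGetD list_player_word j "") < PySem.List.count list_wotd c ∧ st.2 = false then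
          (st.1 ++ [j], st.2)
        else st
      else st)
    (acc, false)).1

-- what A emits for one letter of list_wotd
def pvEA (list_wotd list_player_word : List String) (c : String) : List Int :=
  if PySem.List.count list_player_word c ≥ PySem.List.count list_wotd c then
    (pvMs c list_player_word.zipIdx).take 1
  else pvMs c list_player_word.zipIdx

-- what B emits for one letter of list_wotd
def pvGB (list_wotd list_player_word : List String) (c : String) : List Int :=
  match (list_player_word.zipIdx.foldl
      (fun d (x : String × Nat) => d.insert x.1 (d.getD x.1 [] ++ [((x.2 : Nat) : Int)]))
      PySem.Dict.empty).get? c with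
  | none => []
  | some js =>
      if (js.length : Int) ≥ (list_wotd.foldl
            (fun d letter => d.insert letter (d.getD letter 0 + 1))
            (PySem.Dict.empty : PySem.Dict String Int)).getD c 0 then [PySem.List.pyGetD js 0 0]
      else js

lemma pv_pyRange_nil {a b : Int} (h : b ≤ a) : PySem.List.pyRange a b = [] := by
  rw [PySem.List.pyRange_of_pos a b (by norm_num)]
  simp [show ¬ a < b by omega]

-- a fold over range(k, len p) reading p[j] is a fold over (p.drop k).zipIdx k
lemma pv_foldl_pyRange_zipIdx {β : Type} (p : List String) (f : β → Int → String → β) :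
    ∀ (s : List String) (k : Nat), p.drop k = s → ∀ (init : β),
      (PySem.List.pyRange (k : Int) (PySem.List.len p)).foldl
        (fun acc j => f acc j (PySem.List.pyGetD p j "")) init
      = (s.zipIdx k).foldl (fun acc x => f acc ((x.2 : Nat) : Int) x.1) init := by
  intro s
  induction s with
  | nil =>
      intro k hk init
      have hlen : p.length ≤ k := by
        by_contra h
        have := List.drop_eq_nil_iff.mp hk
        omega
      rw [pv_pyRange_nil (by simp only [PySem.List.len]; exact_mod_cast hlen)]
      simp
  | cons x s ih =>
      intro k hk init
      have hklt : k < p.length := by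
        by_contra h
        rw [List.drop_eq_nil_of_le (by omega)] at hk
        simp at hk
      have hget : PySem.List.pyGetD p (k : Int) "" = x := by
        rw [PySem.List.pyGetD_natCast]
        have hx : p[k]? = some x := by rw [← List.head?_drop, hk]; rfl
        simp [List.getD, hx]
      rw [PySem.List.pyRange_one_cons (by simp only [PySem.List.len]; exact_mod_cast hklt)]
      rw [List.zipIdx_cons]
      simp only [List.foldl_cons, hget]
      have hdrop : p.drop (k + 1) = s := by
        rw [← List.drop_drop, hk]; rfl
      have := ih (k + 1) hdrop (f init (↑k) x)
      rw [show ((k : Int) + 1) = ((k + 1 : Nat) : Int) by push_cast; ring]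
      exact this

-- A's inner loop, characterised on an arbitrary list of (letter, index) pairs
lemma pv_innerA (w p : List String) (c : String) (l : List (String × Nat)) :
    ∀ (acc : List Int) (done : Bool),
      l.foldl (pvStp w p c) (acc, done)
      = if done then (acc, true)
        else if PySem.List.count p c ≥ PySem.List.count w c then
          (acc ++ (pvMs c l).take 1, !(pvMs c l).isEmpty)
        else (acc ++ pvMs c l, false) := by
  induction l with
  | nil => intro acc done; cases done <;> simp [pvMs]
  | cons x l ih =>
      intro acc done
      rw [List.foldl_cons]
      by_cases hc : c = x.1
      · cases done with
        | true =>
            have hstep : pvStp w p c (acc, true) x = (acc, true) := by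
              simp [pvStp, hc]
            rw [hstep, ih]
            simp
        | false =>
            by_cases hge : PySem.List.count p c ≥ PySem.List.count w c
            · have hstep : pvStp w p c (acc, false) x = (acc ++ [((x.2 : Nat) : Int)], true) := by
                unfold pvStp
                rw [if_pos hc, if_pos (And.intro hge rfl)]
              have hms : pvMs c (x :: l) = ((x.2 : Nat) : Int) :: pvMs c l := by
                simp [pvMs, hc]
              rw [hstep, ih, if_pos rfl, if_neg (by simp), if_pos hge, hms]
              simp
            · have hstep : pvStp w p c (acc, false) x = (acc ++ [((x.2 : Nat) : Int)], false) := by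
                unfold pvStp
                rw [if_pos hc, if_neg (fun h => hge h.1), if_pos (And.intro (Nat.lt_of_not_le hge) rfl)]
              have hms : pvMs c (x :: l) = ((x.2 : Nat) : Int) :: pvMs c l := by
                simp [pvMs, hc]
              rw [hstep, ih, hms]
              simp only [Bool.false_eq_true, if_false]
              split_ifs with h
              · simp
      · have hstep : ∀ st, pvStp w p c st x = st := by
          intro st; unfold pvStp; rw [if_neg hc]
        have hms : pvMs c (x :: l) = pvMs c l := by
          simp [pvMs, hc]
        rw [hstep, ih, hms]

lemma pv_outerStep_eq (w p : List String) (acc : List Int) (c : String) :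
    pvOuterStep w p acc c = acc ++ pvEA w p c := by
  unfold pvOuterStep
  have h0 := pv_foldl_pyRange_zipIdx p
      (fun (st : List Int × Bool) (j : Int) (letter : String) =>
        if c = letter then
          if PySem.List.count p letter ≥ PySem.List.count w c ∧ st.2 = false then
            (st.1 ++ [j], true)
          else if PySem.List.count p letter < PySem.List.count w c ∧ st.2 = false then
            (st.1 ++ [j], st.2)
          else st
        else st)
      p 0 rfl (acc, false)
  simp only [Nat.cast_zero] at h0
  rw [h0]
  have hfun : (fun (st : List Int × Bool) (x : String × Nat) =>
      if c = x.1 then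
        if PySem.List.count p x.1 ≥ PySem.List.count w c ∧ st.2 = false then
          (st.1 ++ [((x.2 : Nat) : Int)], true)
        else if PySem.List.count p x.1 < PySem.List.count w c ∧ st.2 = false then
          (st.1 ++ [((x.2 : Nat) : Int)], st.2)
        else st
      else st) = pvStp w p c := by
    funext st x
    by_cases hc : c = x.1
    · subst hc
      simp [pvStp]
    · simp [pvStp, hc]
  rw [hfun, pv_innerA w p c p.zipIdx acc false, if_neg (by simp)]
  unfold pvEA
  by_cases hge : PySem.List.count p c ≥ PySem.List.count w c
  · rw [if_pos hge, if_pos hge]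
  · rw [if_neg hge, if_neg hge]

-- A as a flatMap of per-letter emissions
lemma pv_A_flatMap (w p : List String) :
    orange_letters w p = w.flatMap (pvEA w p) := by
  have h0 : orange_letters w p
      = (PySem.List.pyRange 0 (PySem.List.len w)).foldl
          (fun acc j => pvOuterStep w p acc (PySem.List.pyGetD w j "")) [] := rfl
  rw [h0, PySem.List.foldl_pyRange_pyGetD w "" (pvOuterStep w p) [] (by norm_num)]
  simp only [Int.toNat_zero, List.drop_zero]
  have hfun : (pvOuterStep w p) = (fun acc c => acc ++ pvEA w p c) := by
    funext acc c; exact pv_outerStep_eq w p acc c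
  rw [hfun, PySem.List.foldl_append_eq_flatMap]
  simp

-- the counts dict of B holds exactly the letter counts of list_wotd
lemma pv_counts (w : List String) :
    ∀ (d : PySem.Dict String Int) (c : String),
      (w.foldl (fun d letter => d.insert letter (d.getD letter 0 + 1)) d).getD c 0
        = d.getD c 0 + (PySem.List.count w c : Int) := by
  induction w with
  | nil => intro d c; simp [PySem.List.count]
  | cons x w ih =>
      intro d c
      simp only [List.foldl_cons, ih]
      rw [PySem.Dict.getD_insert]
      by_cases hc : c = x
      · subst hc
        simp [PySem.List.count]
        ring
      · simp [PySem.List.count, hc, Ne.symm hc]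

-- the positions dict of B holds exactly the per-letter index lists
lemma pv_positions (l : List (String × Nat)) :
    ∀ (d : PySem.Dict String (List Int)) (c : String),
      (l.foldl (fun d x => d.insert x.1 (d.getD x.1 [] ++ [((x.2 : Nat) : Int)])) d).get? c
        = if pvMs c l = [] then d.get? c else some (d.getD c [] ++ pvMs c l) := by
  induction l with
  | nil => intro d c; simp [pvMs]
  | cons x l ih =>
      intro d c
      simp only [List.foldl_cons, ih]
      by_cases hc : c = x.1
      · have hms : pvMs c (x :: l) = ((x.2 : Nat) : Int) :: pvMs c l := by
          simp [pvMs, hc]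
        rw [hms]
        rw [PySem.Dict.get?_insert, if_pos hc, PySem.Dict.getD_insert, if_pos hc]
        by_cases hnil : pvMs c l = []
        · simp [hc]
        · simp [hc]
      · have hms : pvMs c (x :: l) = pvMs c l := by
          simp [pvMs, hc]
        rw [hms, PySem.Dict.get?_insert, if_neg hc, PySem.Dict.getD_insert, if_neg hc]

-- B as a flatMap of per-letter emissions
lemma pv_B_flatMap (w p : List String) :
    orange_letters_alt w p = w.flatMap (pvGB w p) := by
  simp only [orange_letters_alt]
  have hfun : (fun (out : List Int) (letter : String) =>
      match (p.zipIdx.foldl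
          (fun d (x : String × Nat) => d.insert x.1 (d.getD x.1 [] ++ [((x.2 : Nat) : Int)]))
          PySem.Dict.empty).get? letter with
      | none => out
      | some js =>
          if (js.length : Int) ≥ (w.foldl
                (fun d letter => d.insert letter (d.getD letter 0 + 1))
                (PySem.Dict.empty : PySem.Dict String Int)).getD letter 0 then
            out ++ [PySem.List.pyGetD js 0 0]
          else out ++ js)
      = (fun out letter => out ++ pvGB w p letter) := by
    funext out letter
    unfold pvGB
    cases h : (p.zipIdx.foldl
        (fun d (x : String × Nat) => d.insert x.1 (d.getD x.1 [] ++ [((x.2 : Nat) : Int)]))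
        PySem.Dict.empty).get? letter with
    | none => simp
    | some js => by_cases hge : (js.length : Int) ≥ (w.foldl
          (fun d letter => d.insert letter (d.getD letter 0 + 1))
          (PySem.Dict.empty : PySem.Dict String Int)).getD letter 0 <;> simp [hge]
  rw [hfun, PySem.List.foldl_append_eq_flatMap]
  simp

-- pvMs over zipIdx counts exactly the occurrences
lemma pv_ms_length (p : List String) (c : String) :
    ∀ (k : Nat), (pvMs c (p.zipIdx k)).length = PySem.List.count p c := by
  induction p with
  | nil => intro k; simp [pvMs, PySem.List.count]
  | cons x p ih =>
      intro k
      rw [List.zipIdx_cons]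
      by_cases hc : c = x
      · have h1 : pvMs c ((x, k) :: p.zipIdx (k + 1)) = ((k : Nat) : Int) :: pvMs c (p.zipIdx (k + 1)) := by
          simp [pvMs, hc]
        rw [h1, List.length_cons, ih (k + 1)]
        simp [PySem.List.count, List.count_cons, hc]
      · have h1 : pvMs c ((x, k) :: p.zipIdx (k + 1)) = pvMs c (p.zipIdx (k + 1)) := by
          simp [pvMs, hc]
        rw [h1, ih (k + 1)]
        simp [PySem.List.count, List.count_cons, show x ≠ c from fun h => hc h.symm]

-- per-letter, A and B emit the same indices
lemma pv_e_eq_g (w p : List String) (c : String) :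
    pvEA w p c = pvGB w p c := by
  unfold pvGB
  rw [pv_positions p.zipIdx PySem.Dict.empty c]
  cases hM : pvMs c p.zipIdx with
  | nil =>
      simp only [if_pos rfl]
      unfold pvEA
      rw [hM]
      split <;> simp
  | cons a t =>
      have hne : pvMs c p.zipIdx ≠ [] := by rw [hM]; simp
      simp only [if_neg (by simp : ¬ (a :: t : List Int) = [])]
      have hgetD : (PySem.Dict.empty : PySem.Dict String (List Int)).getD c [] = [] := by
        simp [PySem.Dict.getD, PySem.Dict.get?_empty]
      rw [hgetD]
      simp only [List.nil_append]
      rw [pv_counts w PySem.Dict.empty c]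
      have hcnt0 : (PySem.Dict.empty : PySem.Dict String Int).getD c 0 = 0 := by
        simp [PySem.Dict.getD, PySem.Dict.get?_empty]
      rw [hcnt0, zero_add]
      have hlen : ((a :: t).length : Int) = (PySem.List.count p c : Int) := by
        have h := pv_ms_length p c 0
        rw [← h, hM]
      unfold pvEA
      rw [hM]
      by_cases hge : PySem.List.count p c ≥ PySem.List.count w c
      · rw [if_pos hge, if_pos (by rw [hlen]; exact_mod_cast hge)]
        simp [PySem.List.pyGetD, PySem.List.pyGet?, PySem.List.pyIdx?]
      · rw [if_neg hge, if_neg (by rw [hlen]; intro h; exact hge (by exact_mod_cast h))]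

-- ===== VERDICT (by name: the statement is the Claim_ definition above) =====
theorem orange_letters_spec : Claim_equal_orange_letters := by
  intro w p _
  unfold Spec_orange_letters
  rw [pv_A_flatMap, pv_B_flatMap]
  exact congrArg (fun f => List.flatMap f w) (funext fun c => pv_e_eq_g w p c)
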